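-- pv_equiv track=rewrite | github.com/MarkDana/TIN | utils/misc.py | _id_order_to_ordered_groups
-- ===== SOURCE A (Python) =====
-- def _id_order_to_ordered_groups(id_to_order_dict):
--     order_to_ids = {}
--     for id, order in id_to_order_dict.items():
--         if order in order_to_ids:
--             order_to_ids[order].append(id)
--         else:
--             order_to_ids[order] = [id]
--     return [order_to_ids[order] for order in sorted(order_to_ids.keys())]
-- ===== SOURCE B (Python) =====
-- def _id_order_to_ordered_groups(id_to_order_dict):
--     items = sorted(id_to_order_dict.items(), key=lambda kv: kv[1])
--     groups = []
--     cur = []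
--     prev = None
--     for i, o in items:
--         if cur and o != prev:
--             groups.append(cur)
--             cur = []
--         cur.append(i)
--         prev = o
--     if cur:
--         groups.append(cur)
--     return groups
-- ===== Notes on version B (the rewrite author's own statement) =====
-- stated objective: alternative
-- what changed: B replaces A's hash-bucketing into a dict followed by sorting the keys with a single stable sort of the (id, order) items by order followed by consecutive-run grouping, so no intermediate dict is built.
import Mathlib
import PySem

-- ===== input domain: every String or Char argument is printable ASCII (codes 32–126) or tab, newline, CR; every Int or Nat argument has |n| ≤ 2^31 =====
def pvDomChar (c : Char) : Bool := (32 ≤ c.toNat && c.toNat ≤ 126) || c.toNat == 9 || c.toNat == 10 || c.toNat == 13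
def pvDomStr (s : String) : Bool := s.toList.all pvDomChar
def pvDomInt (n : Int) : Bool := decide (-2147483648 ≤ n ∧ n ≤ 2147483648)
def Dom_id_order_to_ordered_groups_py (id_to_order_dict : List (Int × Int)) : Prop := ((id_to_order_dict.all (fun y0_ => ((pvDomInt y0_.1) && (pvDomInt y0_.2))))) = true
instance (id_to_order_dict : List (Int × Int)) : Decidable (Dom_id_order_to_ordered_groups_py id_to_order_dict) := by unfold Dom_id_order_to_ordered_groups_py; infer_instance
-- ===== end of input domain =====

-- ===== PORT A =====
-- B replaces A's dict bucketing + key sort by one stable sort of the items followed by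
-- consecutive-run grouping (alternative decomposition, similar cost).
def id_order_to_ordered_groups_py (id_to_order_dict : List (Int × Int)) : List (List Int) :=
  let order_to_ids : PySem.Dict Int (List Int) :=
    id_to_order_dict.foldl
      (fun d p =>
        if d.contains p.2 then d.insert p.2 (d.getD p.2 [] ++ [p.1])
        else d.insert p.2 [p.1])
      PySem.Dict.empty
  (PySem.List.sorted order_to_ids.keys (fun o => o)).map (fun o => order_to_ids.getD o [])

-- ===== PORT B =====
-- one step of B's loop: state = (groups, cur, prev)
def pvGroupStep (st : List (List Int) × List Int × Option Int) (p : Int × Int) :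
    List (List Int) × List Int × Option Int :=
  if st.2.1 ≠ [] ∧ some p.2 ≠ st.2.2 then (st.1 ++ [st.2.1], [p.1], some p.2)
  else (st.1, st.2.1 ++ [p.1], some p.2)

def id_order_to_ordered_groups_py_alt (id_to_order_dict : List (Int × Int)) : List (List Int) :=
  let items := PySem.List.sorted id_to_order_dict (fun kv => kv.2)
  let st := items.foldl pvGroupStep ([], [], none)
  if st.2.1 ≠ [] then st.1 ++ [st.2.1] else st.1

-- ===== PRECONDITION & SPEC =====
def Spec_id_order_to_ordered_groups_py (id_to_order_dict : List (Int × Int)) (out : List (List Int)) : Prop := out = id_order_to_ordered_groups_py_alt id_to_order_dict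
instance (id_to_order_dict : List (Int × Int)) (out : List (List Int)) : Decidable (Spec_id_order_to_ordered_groups_py id_to_order_dict out) := by unfold Spec_id_order_to_ordered_groups_py; infer_instance

-- ===== CLAIM (what is proved, stated in full; the proofs are below) =====
def Claim_equal_id_order_to_ordered_groups_py : Prop := ∀ (id_to_order_dict : List (Int × Int)), Dom_id_order_to_ordered_groups_py id_to_order_dict → Spec_id_order_to_ordered_groups_py id_to_order_dict (id_order_to_ordered_groups_py id_to_order_dict)

-- ===== LEMMAS AND PROOFS =====

-- the common normal form both ports are reduced to:
-- sorted distinct orders, each mapped to its ids in input order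
def pvCanon (l : List (Int × Int)) : List Int :=
  PySem.List.sorted (PySem.Set.ofList (l.map (·.2))) (fun o => o)

def pvGroups (l : List (Int × Int)) : List (List Int) :=
  (pvCanon l).map (fun o => ((l.filter (fun y => y.2 == o)).map (·.1)))

-- ---- A side: the dict loop is a modify-append loop; keys/getD are characterised by PySem lemmas ----

lemma stepA_eq_modify (d : PySem.Dict Int (List Int)) (p : Int × Int) :
    (if d.contains p.2 then d.insert p.2 (d.getD p.2 [] ++ [p.1]) else d.insert p.2 [p.1])
      = d.modify p.2 [] (· ++ [p.1]) := by
  by_cases h : d.contains p.2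
  · simp [h, PySem.Dict.modify]
  · simp [h, PySem.Dict.modify, PySem.Dict.getD_of_not_contains (h := by simpa using h)]

lemma a_eq_groups (l : List (Int × Int)) : id_order_to_ordered_groups_py l = pvGroups l := by
  unfold id_order_to_ordered_groups_py pvGroups
  have hfun : (fun (d : PySem.Dict Int (List Int)) (p : Int × Int) =>
      if d.contains p.2 then d.insert p.2 (d.getD p.2 [] ++ [p.1]) else d.insert p.2 [p.1])
      = (fun d p => d.modify p.2 [] (· ++ [p.1])) :=
    funext fun d => funext fun p => stepA_eq_modify d p
  rw [hfun]
  set d := l.foldl (fun d p => d.modify p.2 [] (· ++ [p.1])) PySem.Dict.empty with hd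
  have hkeys : d.keys = PySem.Set.ofList (l.map (·.2)) := by
    rw [hd, PySem.Dict.keys_foldl_modify_key l (fun p => p.2) [] (fun _ p v => v ++ [p.1])]
    rfl
  have hswap : d = (l.map Prod.swap).foldl (fun d q => d.modify q.1 [] (· ++ [q.2])) PySem.Dict.empty := by
    rw [hd, List.foldl_map]
    rfl
  have hget : ∀ o, d.getD o [] = (l.filter (fun y => y.2 == o)).map (·.1) := by
    intro o
    rw [hswap, PySem.Dict.getD_foldl_modify_append]
    simp [List.filter_map, List.map_map, Function.comp_def]
  show (PySem.List.sorted d.keys (fun o => o)).map (fun o => d.getD o []) = _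
  rw [hkeys]
  exact List.map_congr_left fun o _ => hget o

-- ---- B side, step 1: the stable insertion sort keeps each order class in input order ----

lemma insertBy_cons (b : Int × Int → Int × Int → Bool) (x y : Int × Int) (ys : List (Int × Int)) :
    PySem.List.insertBy b x (y :: ys) = if b x y then x :: y :: ys else y :: PySem.List.insertBy b x ys := rfl

lemma insertBy_eq_takeWhile (x : Int × Int) (s : List (Int × Int)) :
    PySem.List.insertBy (fun a b => decide (a.2 < b.2)) x s
      = s.takeWhile (fun y => !decide (x.2 < y.2)) ++ x :: s.dropWhile (fun y => !decide (x.2 < y.2)) := by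
  induction s with
  | nil => rfl
  | cons y t ih =>
    rw [insertBy_cons]
    by_cases h : x.2 < y.2 <;> simp [h, ih]

lemma dropWhile_gt (x : Int × Int) (s : List (Int × Int))
    (hs : s.Pairwise (fun a b => a.2 ≤ b.2)) :
    ∀ y ∈ s.dropWhile (fun y => !decide (x.2 < y.2)), x.2 < y.2 := by
  induction s with
  | nil => simp
  | cons y t ih =>
    rw [List.pairwise_cons] at hs
    by_cases h : x.2 < y.2
    · rw [List.dropWhile_cons]
      simp only [h, decide_true, Bool.not_true, Bool.false_eq_true, if_false]
      intro z hz
      rcases List.mem_cons.mp hz with hz' | hz'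
      · exact hz' ▸ h
      · exact lt_of_lt_of_le h (hs.1 z hz')
    · rw [List.dropWhile_cons]
      simp only [h, decide_false, Bool.not_false, if_true]
      exact ih hs.2

lemma filter_insertBy (x : Int × Int) (s : List (Int × Int)) (o : Int)
    (hs : s.Pairwise (fun a b => a.2 ≤ b.2)) :
    (PySem.List.insertBy (fun a b => decide (a.2 < b.2)) x s).filter (fun y => y.2 == o)
      = s.filter (fun y => y.2 == o) ++ (if x.2 == o then [x] else []) := by
  rw [insertBy_eq_takeWhile, List.filter_append, List.filter_cons]
  by_cases h : x.2 = o
  · have hdrop : (s.dropWhile (fun y => !decide (x.2 < y.2))).filter (fun y => y.2 == o) = [] := by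
      rw [List.filter_eq_nil_iff]
      intro z hz
      have := dropWhile_gt x s hs z hz
      simp [ne_of_gt (h ▸ this)]
    conv_rhs => rw [← List.takeWhile_append_dropWhile (p := fun y => !decide (x.2 < y.2)) (l := s)]
    rw [List.filter_append, hdrop]
    simp [h]
  · have hx : (x.2 == o) = false := by simp [h]
    conv_rhs => rw [← List.takeWhile_append_dropWhile (p := fun y => !decide (x.2 < y.2)) (l := s)]
    rw [List.filter_append]
    simp [hx]

lemma sorted_append_singleton (l : List (Int × Int)) (x : Int × Int) :
    PySem.List.sorted (l ++ [x]) (fun kv => kv.2)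
      = PySem.List.insertBy (fun a b => decide (a.2 < b.2)) x (PySem.List.sorted l (fun kv => kv.2)) := by
  rw [PySem.List.sorted_eq_foldl_insertBy, PySem.List.sorted_eq_foldl_insertBy, List.foldl_append]
  rfl

lemma filter_sorted (l : List (Int × Int)) (o : Int) :
    (PySem.List.sorted l (fun kv => kv.2)).filter (fun y => y.2 == o) = l.filter (fun y => y.2 == o) := by
  induction l using List.reverseRecOn with
  | nil => rfl
  | append_singleton t x ih =>
    rw [sorted_append_singleton, filter_insertBy x _ o (PySem.List.sorted_pairwise t (fun kv => kv.2)), ih,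
      List.filter_append, List.filter_cons]
    simp [List.filter_nil]

-- ---- B side, step 2: a key-sorted list is the concatenation of its order classes ----

lemma takeWhile_filter_min (k : Int) (s : List (Int × Int))
    (hs : s.Pairwise (fun a b => a.2 ≤ b.2)) (hmin : ∀ y ∈ s, y.2 = k ∨ k < y.2) :
    s.filter (fun y => y.2 == k) = s.takeWhile (fun y => y.2 == k) := by
  induction s with
  | nil => rfl
  | cons y t ih =>
    rw [List.pairwise_cons] at hs
    by_cases h : y.2 = k
    · simp only [List.filter_cons, List.takeWhile_cons, h, beq_self_eq_true, if_true]
      rw [ih hs.2 (fun z hz => hmin z (List.mem_cons_of_mem _ hz))]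
    · have hk : k < y.2 := by rcases hmin y (List.mem_cons_self) with h' | h' <;> [exact absurd h' h; exact h']
      have : t.filter (fun y => y.2 == k) = [] := by
        rw [List.filter_eq_nil_iff]
        intro z hz
        have : k < z.2 := lt_of_lt_of_le hk (hs.1 z hz)
        simp [ne_of_gt this]
      simp [h, this]

lemma dropWhile_min_gt (k : Int) (s : List (Int × Int))
    (hs : s.Pairwise (fun a b => a.2 ≤ b.2)) (hmin : ∀ y ∈ s, y.2 = k ∨ k < y.2) :
    ∀ y ∈ s.dropWhile (fun y => y.2 == k), k < y.2 := by
  induction s with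
  | nil => simp
  | cons y t ih =>
    rw [List.pairwise_cons] at hs
    by_cases h : y.2 = k
    · rw [List.dropWhile_cons]
      simp only [h, beq_self_eq_true, if_true]
      exact ih hs.2 (fun z hz => hmin z (List.mem_cons_of_mem _ hz))
    · have hk : k < y.2 := by rcases hmin y (List.mem_cons_self) with h' | h' <;> [exact absurd h' h; exact h']
      rw [List.dropWhile_cons]
      simp only [beq_iff_eq, h, if_false]
      intro z hz
      rcases List.mem_cons.mp hz with hz' | hz'
      · exact hz' ▸ hk
      · exact lt_of_lt_of_le hk (hs.1 z hz')

lemma eq_flatMap_filter : ∀ (ks : List Int) (s : List (Int × Int)),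
    s.Pairwise (fun a b => a.2 ≤ b.2) → ks.Pairwise (· < ·) → (∀ y ∈ s, y.2 ∈ ks) →
    s = ks.flatMap (fun o => s.filter (fun y => y.2 == o)) := by
  intro ks
  induction ks with
  | nil =>
    intro s _ _ hmem
    cases s with
    | nil => rfl
    | cons y t => exact absurd (hmem y List.mem_cons_self) (by simp)
  | cons k ks' ih =>
    intro s hs hks hmem
    rw [List.pairwise_cons] at hks
    have hmin : ∀ y ∈ s, y.2 = k ∨ k < y.2 := by
      intro y hy
      rcases List.mem_cons.mp (hmem y hy) with h | h
      · exact Or.inl h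
      · exact Or.inr (hks.1 _ h)
    set p : Int × Int → Bool := fun y => y.2 == k with hp
    have hdropmem : ∀ y ∈ s.dropWhile p, y.2 ∈ ks' := by
      intro y hy
      have hgt := dropWhile_min_gt k s hs hmin y hy
      rcases List.mem_cons.mp (hmem y ((List.dropWhile_sublist p).mem hy)) with h | h
      · exact absurd h (ne_of_gt hgt)
      · exact h
    have hdroppw : (s.dropWhile p).Pairwise (fun a b => a.2 ≤ b.2) :=
      List.Pairwise.sublist (List.dropWhile_sublist p) hs
    have htail := ih (s.dropWhile p) hdroppw hks.2 hdropmem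
    have htakeall : ∀ y ∈ s.takeWhile p, y.2 = k := by
      intro y hy
      have := List.mem_takeWhile_imp hy
      simpa [hp] using this
    have hfil : ∀ o ∈ ks', s.filter (fun y => y.2 == o) = (s.dropWhile p).filter (fun y => y.2 == o) := by
      intro o ho
      conv_lhs => rw [← List.takeWhile_append_dropWhile (p := p) (l := s)]
      rw [List.filter_append]
      have : (s.takeWhile p).filter (fun y => y.2 == o) = [] := by
        rw [List.filter_eq_nil_iff]
        intro z hz
        have hzk := htakeall z hz
        have : k < o := hks.1 _ ho
        simp [hzk, ne_of_lt this]
      rw [this, List.nil_append]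
    rw [List.flatMap_cons, takeWhile_filter_min k s hs hmin]
    conv_lhs => rw [← List.takeWhile_append_dropWhile (p := p) (l := s)]
    congr 1
    rw [htail]
    exact (List.flatMap_congr fun o ho => hfil o ho).symm

lemma sorted_eq_flatMap (l : List (Int × Int)) :
    PySem.List.sorted l (fun kv => kv.2)
      = (pvCanon l).flatMap (fun o => l.filter (fun y => y.2 == o)) := by
  have h3 : ∀ y ∈ PySem.List.sorted l (fun kv => kv.2), y.2 ∈ pvCanon l := by
    intro y hy
    rw [pvCanon, PySem.List.mem_sorted, PySem.Set.mem_ofList]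
    exact List.mem_map_of_mem ((PySem.List.mem_sorted _ _ _ _).mp hy)
  have := eq_flatMap_filter (pvCanon l) (PySem.List.sorted l (fun kv => kv.2))
    (PySem.List.sorted_pairwise l (fun kv => kv.2))
    (PySem.List.sorted_ofList_pairwise_lt (l.map (·.2))) h3
  rw [this]
  exact List.flatMap_congr fun o _ => filter_sorted l o

-- ---- B side, step 3: the grouping loop on a concatenation of nonempty constant-order chunks ----

lemma foldl_chunk (o : Int) : ∀ (C : List (Int × Int)), (∀ y ∈ C, y.2 = o) →
    ∀ (gs : List (List Int)) (cur : List Int),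
    C.foldl pvGroupStep (gs, cur, some o) = (gs, cur ++ C.map (·.1), some o) := by
  intro C
  induction C with
  | nil => intro _ gs cur; simp
  | cons y t ih =>
    intro hC gs cur
    have hy : y.2 = o := hC y List.mem_cons_self
    rw [List.foldl_cons]
    have hstep : pvGroupStep (gs, cur, some o) y = (gs, cur ++ [y.1], some o) := by
      simp [pvGroupStep, hy]
    rw [hstep, ih (fun z hz => hC z (List.mem_cons_of_mem _ hz)) gs (cur ++ [y.1])]
    simp

lemma foldl_chunks (f : Int → List (Int × Int)) :
    ∀ (ks : List Int), (∀ o ∈ ks, f o ≠ [] ∧ ∀ y ∈ f o, y.2 = o) → ks.Pairwise (· ≠ ·) →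
    ∀ (gs : List (List Int)) (cur : List Int) (p : Int), cur ≠ [] → (∀ o ∈ ks, o ≠ p) →
    (let st := (ks.flatMap f).foldl pvGroupStep (gs, cur, some p)
     if st.2.1 ≠ [] then st.1 ++ [st.2.1] else st.1)
      = gs ++ [cur] ++ ks.map (fun o => (f o).map (·.1)) := by
  intro ks
  induction ks with
  | nil =>
    intro _ _ gs cur p hcur _
    simp [hcur]
  | cons k ks' ih =>
    intro hf hpw gs cur p hcur hne
    rw [List.pairwise_cons] at hpw
    obtain ⟨hk1, hk2⟩ := hf k List.mem_cons_self
    obtain ⟨y, t, hyt⟩ := List.exists_cons_of_ne_nil hk1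
    have hkp : k ≠ p := hne k List.mem_cons_self
    simp only [List.flatMap_cons, List.foldl_append]
    have hstep1 : pvGroupStep (gs, cur, some p) y = (gs ++ [cur], [y.1], some k) := by
      have : y.2 = k := hk2 y (by rw [hyt]; exact List.mem_cons_self)
      simp [pvGroupStep, hcur, this, hkp]
    have hchunk : (f k).foldl pvGroupStep (gs, cur, some p) = (gs ++ [cur], (f k).map (·.1), some k) := by
      rw [hyt, List.foldl_cons, hstep1,
        foldl_chunk k t (fun z hz => hk2 z (by rw [hyt]; exact List.mem_cons_of_mem _ hz)) _ _]
      simp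
    rw [hchunk]
    have hmapne : (f k).map (·.1) ≠ [] := by simp [hk1]
    have := ih (fun o ho => hf o (List.mem_cons_of_mem _ ho)) hpw.2
      (gs ++ [cur]) ((f k).map (·.1)) k hmapne (fun o ho => (hpw.1 o ho).symm)
    simp only at this ⊢
    rw [this]
    simp

lemma b_eq_groups (l : List (Int × Int)) : id_order_to_ordered_groups_py_alt l = pvGroups l := by
  show (let st := (PySem.List.sorted l (fun kv => kv.2)).foldl pvGroupStep ([], [], none)
        if st.2.1 ≠ [] then st.1 ++ [st.2.1] else st.1) = pvGroups l
  rw [sorted_eq_flatMap]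
  set f : Int → List (Int × Int) := fun o => l.filter (fun y => y.2 == o) with hf
  have hcanon : ∀ o ∈ pvCanon l, f o ≠ [] ∧ ∀ y ∈ f o, y.2 = o := by
    intro o ho
    constructor
    · rw [pvCanon, PySem.List.mem_sorted, PySem.Set.mem_ofList] at ho
      obtain ⟨p, hp, hpo⟩ := List.mem_map.mp ho
      intro hnil
      have : p ∈ f o := by rw [hf]; simp [List.mem_filter, hp, hpo]
      rw [hnil] at this
      exact absurd this (by simp)
    · intro y hy
      rw [hf] at hy
      simpa using (List.mem_filter.mp hy).2
  have hpw : (pvCanon l).Pairwise (· < ·) := PySem.List.sorted_ofList_pairwise_lt (l.map (·.2))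
  cases hks : pvCanon l with
  | nil => simp [pvGroups, hks]
  | cons k ks' =>
    rw [hks] at hcanon hpw
    rw [List.pairwise_cons] at hpw
    obtain ⟨hk1, hk2⟩ := hcanon k List.mem_cons_self
    obtain ⟨y, t, hyt⟩ := List.exists_cons_of_ne_nil hk1
    have hstep1 : pvGroupStep ([], [], none) y = ([], [y.1], some k) := by
      have : y.2 = k := hk2 y (by rw [hyt]; exact List.mem_cons_self)
      simp [pvGroupStep, this]
    have hchunk : (f k).foldl pvGroupStep ([], [], none) = ([], (f k).map (·.1), some k) := by
      rw [hyt, List.foldl_cons, hstep1,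
        foldl_chunk k t (fun z hz => hk2 z (by rw [hyt]; exact List.mem_cons_of_mem _ hz)) _ _]
      simp
    have hmapne : (f k).map (·.1) ≠ [] := by simp [hk1]
    have hrest := foldl_chunks f ks' (fun o ho => hcanon o (List.mem_cons_of_mem _ ho))
      (hpw.2.imp ne_of_lt) [] ((f k).map (·.1)) k hmapne (fun o ho => (ne_of_lt (hpw.1 o ho)).symm)
    simp only [List.flatMap_cons, List.foldl_append, hchunk]
    simp only at hrest
    rw [hrest]
    simp [pvGroups, hks]
    exact ⟨rfl, fun a _ => rfl⟩

-- ===== VERDICT (by name: the statement is the Claim_ definition above) =====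
theorem id_order_to_ordered_groups_py_spec : Claim_equal_id_order_to_ordered_groups_py := by
  intro l _
  unfold Spec_id_order_to_ordered_groups_py
  rw [a_eq_groups, b_eq_groups]
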